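-- pv_equiv track=rewrite | github.com/fiatjaf/txindex | naive_eval.py | _CastToBool
-- ===== SOURCE A (Python) =====
-- _bord = lambda x: x
--
-- def _CastToBool(s):
--     for i in range(len(s)):
--         sv = _bord(s[i])
--         if sv != 0:
--             if (i == (len(s) - 1)) and (sv == 0x80):
--                 return False
--             return True
--
--     return False
-- ===== SOURCE B (Python) =====
-- def _CastToBool(s):
--     # collect ALL nonzero positions, then decide from that index list:
--     # truthy unless there are no nonzero bytes, or the only nonzero byte
--     # is the final one and it is the negative-zero sign byte 0x80.
--     nz = [i for i, v in enumerate(s) if v != 0]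
--     if not nz:
--         return False
--     return nz != [len(s) - 1] or s[-1] != 0x80
-- ===== Notes on version B (the rewrite author's own statement) =====
-- stated objective: alternative
-- what changed: Instead of an early-return scan with an index-equality special case, B materialises the full list of nonzero indices in one comprehension and decides by comparing that list against the singleton [len(s)-1] plus a last-byte check.
import Mathlib
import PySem

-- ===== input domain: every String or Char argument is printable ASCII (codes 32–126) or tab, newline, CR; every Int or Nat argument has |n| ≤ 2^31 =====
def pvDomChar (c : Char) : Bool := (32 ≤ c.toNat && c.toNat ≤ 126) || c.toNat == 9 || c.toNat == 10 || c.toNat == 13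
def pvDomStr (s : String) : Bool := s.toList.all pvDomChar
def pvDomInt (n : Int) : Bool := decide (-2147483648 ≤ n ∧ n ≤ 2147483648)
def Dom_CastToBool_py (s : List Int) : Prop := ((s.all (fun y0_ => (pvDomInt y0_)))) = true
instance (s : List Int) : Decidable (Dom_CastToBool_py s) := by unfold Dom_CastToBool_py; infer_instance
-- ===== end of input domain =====

-- B replaces A's early-return index scan by a two-stage computation: collect the
-- list of all nonzero indices, then decide by comparing it with [len(s)-1];
-- objective: alternative (same cost, different decomposition).

-- ===== PORT A =====
-- for i in range(len(s)): early return inside the loop, ported as the structural recursion on i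
def castLoopA (s : List Int) (i : Nat) : Bool :=
  if h : i < s.length then
    let sv := s[i]
    if sv ≠ 0 then
      if i = s.length - 1 ∧ sv = 0x80 then false else true
    else castLoopA s (i + 1)
  else false
termination_by s.length - i

def CastToBool_py (s : List Int) : Bool := castLoopA s 0

-- ===== PORT B =====
-- nz = [i for i, v in enumerate(s) if v != 0]
-- if not nz: return False
-- return nz != [len(s) - 1] or s[-1] != 0x80
def CastToBool_py_alt (s : List Int) : Bool :=
  let nz : List Int := ((PySem.List.enumerate s).filter (fun p => p.2 ≠ 0)).map (·.1)
  if nz.isEmpty then false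
  else
    decide (nz ≠ [(s.length : Int) - 1]) ||
    (match PySem.List.pyGet? s (-1) with
     | some v => decide (v ≠ 0x80)
     | none => false)

-- ===== PRECONDITION & SPEC =====
def Spec_CastToBool_py (s : List Int) (out : Bool) : Prop := out = CastToBool_py_alt s
instance (s : List Int) (out : Bool) : Decidable (Spec_CastToBool_py s out) := by unfold Spec_CastToBool_py; infer_instance

-- ===== CLAIM (what is proved, stated in full; the proofs are below) =====
def Claim_equal_CastToBool_py : Prop := ∀ (s : List Int), Dom_CastToBool_py s → Spec_CastToBool_py s (CastToBool_py s)

-- ===== LEMMAS AND PROOFS =====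

-- closed-form value of the last-byte test both sides reduce to
def lastTest (s : List Int) : Bool :=
  match s.getLast? with
  | some v => decide (v ≠ 0 ∧ v ≠ 0x80)
  | none => false

-- the value of A's loop from index i, in closed form over the suffix s.drop i
theorem castLoopA_closed (s : List Int) (i : Nat) :
    castLoopA s i =
      (((s.drop i).dropLast.any (fun x => x ≠ 0)) || (decide (i < s.length) && lastTest s)) := by
  induction i using castLoopA.induct (s := s) with
  | case1 i h sv hnz heq =>
    rw [castLoopA, dif_pos h]
    simp only [sv] at hnz heq
    rw [if_pos hnz, if_pos heq]
    obtain ⟨hi, hsv⟩ := heq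
    have hlen : s.length = i + 1 := by omega
    have hdrop : s.drop i = [s[i]] := by
      rw [List.drop_eq_getElem_cons h]; congr 1
      exact List.drop_of_length_le (by omega)
    have hlast : s.getLast? = some s[i] := by
      rw [List.getLast?_eq_getElem?]; simp [hlen]
    rw [hdrop]
    simp [lastTest, hlast, hsv, h]
  | case2 i h sv hnz hne =>
    rw [castLoopA]
    simp only [sv] at hnz hne ⊢
    simp only [if_pos hnz, if_neg hne]
    by_cases hi : i = s.length - 1
    · have hsv80 : s[i] ≠ 0x80 := fun hc => hne ⟨hi, hc⟩
      have hlen : s.length = i + 1 := by omega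
      have hdrop : s.drop i = [s[i]] := by
        rw [List.drop_eq_getElem_cons h]; congr 1
        exact List.drop_of_length_le (by omega)
      have hlast : s.getLast? = some s[i] := by
        rw [List.getLast?_eq_getElem?]; simp [hlen]
      simp [hdrop, lastTest, hlast, h, hnz, hsv80]
    · have hi2 : i + 1 < s.length := by omega
      have hmem : s[i] ∈ (s.drop i).dropLast := by
        rw [List.drop_eq_getElem_cons h]
        have : s.drop (i+1) ≠ [] := by
          simp only [ne_eq, List.drop_eq_nil_iff]; omega
        rw [List.dropLast_cons_of_ne_nil this]
        exact List.mem_cons_self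
      have : (s.drop i).dropLast.any (fun x => x ≠ 0) = true := by
        rw [List.any_eq_true]; exact ⟨s[i], hmem, by simpa using hnz⟩
      rw [this, Bool.true_or, dif_pos h]
  | case3 i h sv hz ih =>
    rw [castLoopA]
    simp only [sv] at hz ⊢
    rw [dif_pos h, if_neg hz, ih]
    have hz' : s[i] = 0 := by simpa using hz
    by_cases hi : i + 1 < s.length
    · have hdrop : s.drop i = s[i] :: s.drop (i+1) := List.drop_eq_getElem_cons h
      have hne : s.drop (i+1) ≠ [] := by
        simp only [ne_eq, List.drop_eq_nil_iff]; omega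
      rw [hdrop, List.dropLast_cons_of_ne_nil hne]
      simp [h, hi, hz']
    · have hlen : s.length = i + 1 := by omega
      have hdrop : s.drop i = [s[i]] := by
        rw [List.drop_eq_getElem_cons h]; congr 1
        exact List.drop_of_length_le (by omega)
      have hlast : s.getLast? = some s[i] := by
        rw [List.getLast?_eq_getElem?]; simp [hlen]
      have hd2 : s.drop (i+1) = [] := List.drop_of_length_le (by omega)
      simp [hdrop, hd2, hi, h, lastTest, hlast, hz']
  | case4 i h =>
    rw [castLoopA]
    have : s.drop i = [] := List.drop_of_length_le (by omega)
    simp [h, this]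

-- B's index list, abstracted for the proofs
def nzIdx (s : List Int) : List Int :=
  ((PySem.List.enumerate s).filter (fun p => p.2 ≠ 0)).map (·.1)

theorem enumerate_append (xs ys : List Int) (st : Int) :
    PySem.List.enumerate (xs ++ ys) st
      = PySem.List.enumerate xs st ++ PySem.List.enumerate ys (st + xs.length) := by
  induction xs generalizing st with
  | nil => simp [PySem.List.enumerate_nil]
  | cons x xs ih =>
    simp [PySem.List.enumerate_cons, ih]
    ring_nf

theorem mem_enumerate_fst_lt (xs : List Int) (st : Int) (p : Int × Int)
    (hp : p ∈ PySem.List.enumerate xs st) : p.1 < st + xs.length := by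
  induction xs generalizing st with
  | nil => simp [PySem.List.enumerate_nil] at hp
  | cons x xs ih =>
    rw [PySem.List.enumerate_cons] at hp
    rcases List.mem_cons.1 hp with h | h
    · subst h; simp
    · have := ih (st + 1) h; simp at this ⊢; omega

theorem nzIdx_append_singleton (t : List Int) (a : Int) :
    nzIdx (t ++ [a]) = nzIdx t ++ (if a ≠ 0 then [(t.length : Int)] else []) := by
  unfold nzIdx
  rw [enumerate_append]
  simp [PySem.List.enumerate_cons, PySem.List.enumerate_nil, List.filter_append]
  split_ifs with h <;> simp [h]

theorem nzIdx_lt (t : List Int) (i : Int) (hi : i ∈ nzIdx t) : i < t.length := by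
  unfold nzIdx at hi
  rcases List.mem_map.1 hi with ⟨p, hp, hpe⟩
  have := mem_enumerate_fst_lt t 0 p (List.mem_of_mem_filter hp)
  omega

theorem nzIdx_nil_iff (t : List Int) :
    nzIdx t = [] ↔ t.any (fun x => x ≠ 0) = false := by
  unfold nzIdx
  rw [List.map_eq_nil_iff, List.filter_eq_nil_iff]
  constructor
  · intro h
    rw [List.any_eq_false]
    intro x hx
    rcases List.mem_iff_getElem.1 hx with ⟨k, hk, rfl⟩
    have hmem : ((0 : Int) + k, t[k]) ∈ PySem.List.enumerate t 0 := by
      have := PySem.List.getElem_enumerate (xs := t) (s := 0) (k := k)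
        (by simpa [PySem.List.length_enumerate] using hk)
      rw [← this]
      exact List.getElem_mem _
    have := h _ hmem
    simpa using this
  · intro h p hp
    rw [List.any_eq_false] at h
    have h2 : p.2 ∈ t := by
      have : p.2 ∈ (PySem.List.enumerate t 0).map (·.2) := List.mem_map_of_mem hp
      simpa [PySem.List.map_snd_enumerate] using this
    have := h _ h2
    simpa using this

theorem alt_eq (s : List Int) :
    CastToBool_py_alt s =
      (if (nzIdx s).isEmpty then false
       else
         decide (nzIdx s ≠ [(s.length : Int) - 1]) ||
         (match PySem.List.pyGet? s (-1) with
          | some v => decide (v ≠ 0x80)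
          | none => false)) := rfl

-- B in the same closed form as A's loop
theorem alt_closed (s : List Int) :
    CastToBool_py_alt s =
      ((s.dropLast.any (fun x => x ≠ 0)) || (decide (0 < s.length) && lastTest s)) := by
  induction s using List.reverseRecOn with
  | nil => simp [alt_eq, nzIdx, PySem.List.enumerate_nil, lastTest]
  | append_singleton t a _ =>
    rw [alt_eq, nzIdx_append_singleton]
    have hget : PySem.List.pyGet? (t ++ [a]) (-1) = some a :=
      PySem.List.pyGet?_neg_one_append_singleton t a
    have hlast : (t ++ [a]).getLast? = some a := by simp
    have hlenc : ((t ++ [a]).length : Int) - 1 = (t.length : Int) := by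
      simp only [List.length_append, List.length_cons, List.length_nil]
      push_cast; ring
    by_cases ht : t.any (fun x => x ≠ 0) = true
    · -- some byte before the last is nonzero: nzIdx t ≠ [] and contains an index < t.length
      have hne : nzIdx t ≠ [] := by
        intro hc; rw [nzIdx_nil_iff] at hc; rw [hc] at ht; exact Bool.false_ne_true ht
      rcases List.exists_mem_of_ne_nil _ hne with ⟨i, hi⟩
      have hilt := nzIdx_lt t i hi
      have hnz_ne : nzIdx t ++ (if a ≠ 0 then [(t.length : Int)] else []) ≠ [(t.length : Int)] := by
        intro hc
        have hi' : i ∈ ([(t.length : Int)] : List Int) := by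
          rw [← hc]; exact List.mem_append_left _ hi
        simp at hi'; omega
      have hnzne' : (nzIdx t ++ (if a ≠ 0 then [(t.length : Int)] else [])) ≠ [] := by
        intro hc; rcases List.append_eq_nil_iff.1 hc with ⟨h1, _⟩; exact hne h1
      rw [hlenc, hget, if_neg (by simpa using hnzne'), decide_eq_true hnz_ne, Bool.true_or,
        List.dropLast_concat, ht, Bool.true_or]
    · -- all bytes before the last are zero
      have htf : t.any (fun x => x ≠ 0) = false := eq_false_of_ne_true ht
      have hnil : nzIdx t = [] := (nzIdx_nil_iff t).2 htf
      rw [hnil, List.nil_append, List.dropLast_concat, htf, Bool.false_or]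
      by_cases ha : a = 0
      · subst ha
        simp [lastTest, hlast]
      · have hif : (if a ≠ 0 then [(t.length : Int)] else []) = [(t.length : Int)] := by simp [ha]
        rw [hif, hlenc, hget]
        simp [lastTest, hlast, ha]

-- ===== VERDICT (by name: the statement is the Claim_ definition above) =====
theorem CastToBool_py_spec : Claim_equal_CastToBool_py := by
  intro s _
  unfold Spec_CastToBool_py CastToBool_py
  rw [castLoopA_closed, alt_closed]
  simp
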